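-- pv_equiv track=rewrite | github.com/xiongjun19/common_tools | tools/clean_json.py | _get_begin_end
-- ===== SOURCE A (Python) =====
-- def _get_begin_end(line_arr):
--     b = 0
--     e = len(line_arr) - 1
--
--     for i, l in enumerate(line_arr):
--         l = l.strip()
--         if '[' in l:
--             b = i
--             break
--     j = e
--     while j > 0:
--         if line_arr[j].strip() == ']':
--             e = j
--             break
--         j -= 1
--     return b, e
-- ===== SOURCE B (Python) =====
-- def _get_begin_end(line_arr):
--     b = 0
--     found = False
--     e = len(line_arr) - 1
--     for i, l in enumerate(line_arr):
--         s = l.strip()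
--         if not found and '[' in s:
--             b = i
--             found = True
--         if i > 0 and s == ']':
--             e = i
--     return b, e
-- ===== Notes on version B (the rewrite author's own statement) =====
-- stated objective: simpler
-- what changed: A's two scans (a forward break-on-first '[' scan plus a separate backward while-loop for the last ']' line) are merged into one forward pass over enumerate that records the first '[' index via a found flag and keeps overwriting e with the latest i>0 whose stripped line equals ']'.
import Mathlib
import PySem

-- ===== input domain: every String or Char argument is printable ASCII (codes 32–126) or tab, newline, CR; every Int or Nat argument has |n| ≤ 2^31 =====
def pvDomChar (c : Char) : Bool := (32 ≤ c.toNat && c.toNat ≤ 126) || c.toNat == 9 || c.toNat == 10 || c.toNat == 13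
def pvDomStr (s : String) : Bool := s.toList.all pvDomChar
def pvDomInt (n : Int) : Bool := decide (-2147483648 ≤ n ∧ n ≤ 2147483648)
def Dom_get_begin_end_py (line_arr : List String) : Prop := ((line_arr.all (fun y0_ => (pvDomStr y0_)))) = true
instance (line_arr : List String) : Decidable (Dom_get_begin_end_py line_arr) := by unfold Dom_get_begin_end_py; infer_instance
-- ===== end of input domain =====

-- B replaces A's forward '['-scan plus backward ']'-scan by a single forward pass (objective: simpler, same cost).

-- ===== PORT A =====
-- A's first loop: break at the first enumerated line whose strip contains '[' (b stays 0 otherwise).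
def pvAFindB : List (Int × String) → Int
  | [] => 0
  | (i, l) :: rest =>
      if PySem.Str.isIn "[" (PySem.Str.strip l) then i else pvAFindB rest

-- A's while loop: j counts down from len-1 to 1; break at the first j with line_arr[j].strip() == ']'.
-- Fuel is the current j (always < len when entered, so getD's default is never used).
def pvAFindE (xs : List String) (d : Int) : Nat → Int
  | 0 => d
  | j + 1 =>
      if PySem.Str.strip (xs.getD (j + 1) "") = "]" then ((j : Int) + 1)
      else pvAFindE xs d j

def get_begin_end_py (line_arr : List String) : Int × Int :=
  (pvAFindB (PySem.List.enumerate line_arr 0),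
   pvAFindE line_arr ((line_arr.length : Int) - 1) (line_arr.length - 1))

-- ===== PORT B =====
-- one loop body: record the first '[' line (found flag), keep the last i>0 with strip == ']'
def pvBStep (st : Int × Bool × Int) (p : Int × String) : Int × Bool × Int :=
  (if !st.2.1 && PySem.Str.isIn "[" (PySem.Str.strip p.2) then p.1 else st.1,
   st.2.1 || PySem.Str.isIn "[" (PySem.Str.strip p.2),
   if p.1 > 0 ∧ PySem.Str.strip p.2 = "]" then p.1 else st.2.2)

def get_begin_end_py_alt (line_arr : List String) : Int × Int :=
  (((PySem.List.enumerate line_arr 0).foldl pvBStep (0, false, (line_arr.length : Int) - 1)).1,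
   ((PySem.List.enumerate line_arr 0).foldl pvBStep (0, false, (line_arr.length : Int) - 1)).2.2)

-- ===== PRECONDITION & SPEC =====
def Spec_get_begin_end_py (line_arr : List String) (out : Int × Int) : Prop := out = get_begin_end_py_alt line_arr
instance (line_arr : List String) (out : Int × Int) : Decidable (Spec_get_begin_end_py line_arr out) := by unfold Spec_get_begin_end_py; infer_instance

-- ===== CLAIM (what is proved, stated in full; the proofs are below) =====
def Claim_equal_get_begin_end_py : Prop := ∀ (line_arr : List String), Dom_get_begin_end_py line_arr → Spec_get_begin_end_py line_arr (get_begin_end_py line_arr)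

-- ===== LEMMAS AND PROOFS =====

-- the e-only view of B's loop body
def pvGE (acc : Int) (p : Int × String) : Int :=
  if p.1 > 0 ∧ PySem.Str.strip p.2 = "]" then p.1 else acc

-- once found is true, the b component never changes
theorem pvB_found_fix (l : List (Int × String)) (b e : Int) :
    (l.foldl pvBStep (b, true, e)).1 = b := by
  induction l generalizing e with
  | nil => rfl
  | cons p t ih => simpa [pvBStep] using ih _

-- b component of B's fold = A's first-match scan
theorem pvB_fst (l : List (Int × String)) (e : Int) :
    (l.foldl pvBStep (0, false, e)).1 = pvAFindB l := by
  induction l generalizing e with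
  | nil => rfl
  | cons p t ih =>
      obtain ⟨i, s⟩ := p
      by_cases h : PySem.Str.isIn "[" (PySem.Str.strip s) = true
      · simp at h
        simp [pvBStep, pvAFindB, h, pvB_found_fix]
      · simp at h
        simp [pvBStep, pvAFindB, h, ih]

-- e component of B's fold depends only on the e accumulator
theorem pvB_snd (l : List (Int × String)) (st : Int × Bool × Int) :
    (l.foldl pvBStep st).2.2 = l.foldl pvGE st.2.2 := by
  induction l generalizing st with
  | nil => rfl
  | cons p t ih =>
      rw [List.foldl_cons, List.foldl_cons, ih]
      rfl

-- A's backward scan ignores elements beyond its fuel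
theorem pvAFindE_append (ys : List String) (x : String) (d : Int) (m : Nat) (hm : m < ys.length) :
    pvAFindE (ys ++ [x]) d m = pvAFindE ys d m := by
  induction m with
  | zero => rfl
  | succ j ih =>
      have hj : j + 1 < ys.length := hm
      have hg : (ys ++ [x]).getD (j + 1) "" = ys.getD (j + 1) "" := by
        simp [List.getD_eq_getElem?_getD, List.getElem?_append_left hj]
      rw [pvAFindE, pvAFindE, hg]
      split
      · rfl
      · exact ih (Nat.lt_of_succ_lt hm)

-- forward "keep the last match" over enumerate = A's backward "first match from the top"
theorem pvE_eq (xs : List String) (d : Int) :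
    (PySem.List.enumerate xs 0).foldl pvGE d = pvAFindE xs d (xs.length - 1) := by
  induction xs using List.reverseRecOn generalizing d with
  | nil => rfl
  | append_singleton ys x ih =>
      rw [PySem.List.enumerate_append, List.foldl_append]
      cases ys with
      | nil => simp [pvAFindE, pvGE, PySem.List.enumerate]
      | cons y t =>
          have hL : ((y :: t) ++ [x]).length - 1 = t.length + 1 := by simp
          rw [hL, pvAFindE]
          have hget : ((y :: t) ++ [x]).getD (t.length + 1) "" = x := by
            simp [List.getD_eq_getElem?_getD]
          rw [hget]
          have hIH : (PySem.List.enumerate (y :: t) 0).foldl pvGE d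
              = pvAFindE (y :: t) d (t.length) := by
            simpa using ih d
          by_cases hq : PySem.Str.strip x = "]"
          · rw [if_pos hq]
            simp only [PySem.List.enumerate_cons, PySem.List.enumerate_nil,
              List.foldl_cons, List.foldl_nil, List.length_cons]
            rw [pvGE, if_pos ⟨by positivity, hq⟩]
            push_cast
            ring
          · rw [if_neg hq, hIH]
            simp only [PySem.List.enumerate_cons, PySem.List.enumerate_nil,
              List.foldl_cons, List.foldl_nil, List.length_cons]
            rw [pvGE, if_neg (by simp [hq]), pvAFindE_append _ _ _ _ (by simp)]

-- ===== VERDICT (by name: the statement is the Claim_ definition above) =====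
theorem get_begin_end_py_spec : Claim_equal_get_begin_end_py := by
  intro xs _
  unfold Spec_get_begin_end_py get_begin_end_py get_begin_end_py_alt
  rw [pvB_fst, pvB_snd, pvE_eq]
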